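-- pv_equiv track=rewrite | github.com/sladuf/Algorithm | Programmers/월간 코드 챌린지/시즌2/PRO77885.py | solution
-- ===== SOURCE A (Python) =====
-- def solution(numbers):
--     answer = []
--     for num in numbers:
--         b_num = bin(num)[2:]
--         if '0' in b_num:
--             b_num = list(b_num)
--             for i in range(len(b_num)-1,-1,-1):
--                 if b_num[i] == '0':
--                     b_num[i] = '1'
--                     for j in range(i+1,len(b_num)):
--                         if b_num[j] == '1':
--                             b_num[j] = '0'
--                             break
--                     break
--             b_num = "".join(b_num)
--         else:
--             b_num = "0b10" + b_num[1:]
--         answer.append(int(b_num,2))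
--     return answer
-- ===== SOURCE B (Python) =====
-- def solution(numbers):
--     def closest(num):
--         m = (num + 1) & ~num          # mask of the lowest zero bit of num
--         return num + 1 if m == 1 else num + (m >> 1)
--     return [closest(num) for num in numbers]
-- ===== Notes on version B (the rewrite author's own statement) =====
-- stated objective: idiomatic
-- what changed: Replaces the binary-string construction and the two index loops scanning characters with one constant-time bit-arithmetic formula per number ((num+1) & ~num gives the lowest zero-bit mask).
-- outside the precondition, e.g. on solution([-1]): A returns [5], B returns [-1]; on solution([-7]): A returns [23], B returns [-6]
import Mathlib
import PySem

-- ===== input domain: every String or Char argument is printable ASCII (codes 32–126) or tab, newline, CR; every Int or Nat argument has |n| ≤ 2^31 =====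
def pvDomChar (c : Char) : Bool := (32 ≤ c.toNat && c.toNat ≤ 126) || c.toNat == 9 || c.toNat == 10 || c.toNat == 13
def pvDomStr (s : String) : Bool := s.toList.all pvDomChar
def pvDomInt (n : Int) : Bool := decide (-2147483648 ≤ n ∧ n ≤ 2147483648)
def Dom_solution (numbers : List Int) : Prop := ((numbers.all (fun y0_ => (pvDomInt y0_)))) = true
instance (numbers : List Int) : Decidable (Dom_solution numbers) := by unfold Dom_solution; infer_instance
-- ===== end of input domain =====

-- B replaces A's per-number binary-string building and index loops by one bit-arithmetic formula (idiomatic; same asymptotic cost).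

-- ===== PORT A =====
-- bin(n)[2:] for n ≥ 0, as a list of chars (MSB first); bin(0)[2:] = "0"
def binDigits : Nat → List Char
  | 0 => []
  | n+1 => binDigits ((n+1)/2) ++ [if (n+1) % 2 = 1 then '1' else '0']

def pyBin (n : Nat) : List Char := if n = 0 then ['0'] else binDigits n

-- inner j-loop: scan right from i+1, turn the first '1' into '0' (break)
def flipFirstOneFrom : List Char → List Char
  | [] => []
  | c :: rest => if c = '1' then '0' :: rest else c :: flipFirstOneFrom rest

-- outer i-loop: scan left from the end for the first '0' (i.e. the rightmost '0'),
-- turn it into '1', then run the inner loop on the part right of it (break)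
def flipRightmostZero : List Char → List Char
  | [] => []
  | c :: rest =>
      if '0' ∈ rest then c :: flipRightmostZero rest
      else if c = '0' then '1' :: flipFirstOneFrom rest
      else c :: rest

-- int(s, 2) on a string of binary digits
def parseBin (bs : List Char) : Nat :=
  bs.foldl (fun a c => 2 * a + (if c = '1' then 1 else 0)) 0

def solution (numbers : List Int) : List Int :=
  numbers.foldl (fun answer num =>
    -- num.toNat: exact for num ≥ 0 (guaranteed by Pre_solution);
    -- on negatives Python A raises ValueError or slices the 'b' of the '0b' prefix (excluded by Pre_solution)
    let b := pyBin num.toNat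
    let b' := if '0' ∈ b then flipRightmostZero b
              else '1' :: '0' :: b.drop 1          -- "0b10" + b_num[1:], then int(·, 2)
    answer ++ [(parseBin b' : Int)]) []

-- ===== PORT B =====
def closestAlt (num : Int) : Int :=
  let m := PySem.Int.band (num + 1) (Int.not num)   -- (num + 1) & ~num
  if m = 1 then num + 1 else num + (m >>> (1 : Nat))   -- m >> 1

def solution_alt (numbers : List Int) : List Int := numbers.map closestAlt

-- ===== PRECONDITION & SPEC =====
-- Pre_ restricts to the natural domain of the puzzle (non-negative integers): on a list with a
-- negative element A raises ValueError, except for elements -1,-3,-7,…,-(2^t-1) where A returns an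
-- accidental value produced by slicing the 'b' of Python's '0b' prefix into the result string.
def Pre_solution (numbers : List Int) : Prop := ∀ x ∈ numbers, 0 ≤ x
instance (numbers : List Int) : Decidable (Pre_solution numbers) := by unfold Pre_solution; infer_instance
def pvWitness_solution : List Int := [0, 1, 2, 3, 6, 12, 2147483648]

def Spec_solution (numbers : List Int) (out : List Int) : Prop := out = solution_alt numbers
instance (numbers : List Int) (out : List Int) : Decidable (Spec_solution numbers out) := by unfold Spec_solution; infer_instance

-- ===== CLAIM (what is proved, stated in full; the proofs are below) =====
def Claim_equal_solution : Prop := ∀ (numbers : List Int), Dom_solution numbers → Pre_solution numbers → Spec_solution numbers (solution numbers)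

-- ===== LEMMAS AND PROOFS =====

-- A's per-element computation, as a function of the non-negative value
def FA (n : Nat) : Nat :=
  parseBin (if '0' ∈ pyBin n then flipRightmostZero (pyBin n) else '1' :: '0' :: (pyBin n).drop 1)

theorem binDigits_zero : binDigits 0 = [] := by simp [binDigits]

theorem binDigits_pos (n : Nat) (h : 0 < n) :
    binDigits n = binDigits (n / 2) ++ [if n % 2 = 1 then '1' else '0'] := by
  cases n with
  | zero => omega
  | succ m => rw [binDigits]

theorem parseBin_append_single (bs : List Char) (c : Char) :
    parseBin (bs ++ [c]) = 2 * parseBin bs + (if c = '1' then 1 else 0) := by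
  simp [parseBin, List.foldl_append]

theorem parseBin_binDigits (n : Nat) : parseBin (binDigits n) = n := by
  induction n using Nat.strong_induction_on with
  | _ n ih =>
    cases Nat.eq_zero_or_pos n with
    | inl h => subst h; rw [binDigits_zero]; rfl
    | inr h =>
      rw [binDigits_pos n h, parseBin_append_single, ih (n / 2) (Nat.div_lt_self h one_lt_two)]
      by_cases hp : n % 2 = 1 <;> simp [hp] <;> omega

theorem binDigits_ne_nil (n : Nat) (h : 0 < n) : binDigits n ≠ [] := by
  rw [binDigits_pos n h]; simp

theorem binDigits_one : binDigits 1 = ['1'] := by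
  rw [binDigits_pos 1 one_pos]; norm_num [binDigits_zero]

theorem flipRightmostZero_append_zero (bs : List Char) :
    flipRightmostZero (bs ++ ['0']) = bs ++ ['1'] := by
  induction bs with
  | nil => rfl
  | cons c rest ih => simp [flipRightmostZero, ih]

theorem flipFirstOneFrom_append (xs t : List Char) (h : '1' ∈ xs) :
    flipFirstOneFrom (xs ++ t) = flipFirstOneFrom xs ++ t := by
  induction xs with
  | nil => simp at h
  | cons c rest ih =>
    by_cases hc : c = '1'
    · simp [flipFirstOneFrom, hc]
    · simp only [List.mem_cons] at h
      simp [flipFirstOneFrom, hc, ih (h.resolve_left (fun e => hc e.symm))]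

theorem flipRightmostZero_zero_one (bs : List Char) :
    flipRightmostZero ((bs ++ ['0']) ++ ['1']) = (bs ++ ['1']) ++ ['0'] := by
  induction bs with
  | nil => rfl
  | cons c rest ih => simp [flipRightmostZero] at ih ⊢; simp [ih]

theorem flipRightmostZero_one_one (cs : List Char) (h : '0' ∈ cs) :
    flipRightmostZero ((cs ++ ['1']) ++ ['1']) = flipRightmostZero (cs ++ ['1']) ++ ['1'] := by
  induction cs with
  | nil => simp at h
  | cons c rest ih =>
    by_cases hr : '0' ∈ rest
    · have ih' := ih hr
      have h1 : '0' ∈ (rest ++ ['1']) ++ ['1'] := by simp [hr]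
      have h2 : '0' ∈ rest ++ ['1'] := by simp [hr]
      simp only [List.cons_append, flipRightmostZero, if_pos h1, if_pos h2] at *
      simp only [List.append_assoc, List.singleton_append] at ih' ⊢
      simp [ih']
    · have hc : c = '0' := by
        simp only [List.mem_cons] at h
        exact (h.resolve_right hr).symm
      have h1 : ¬ ('0' ∈ (rest ++ ['1']) ++ ['1']) := by simp [hr]
      have h2 : ¬ ('0' ∈ rest ++ ['1']) := by simp [hr]
      have hone : '1' ∈ rest ++ ['1'] := by simp
      have hff := flipFirstOneFrom_append (rest ++ ['1']) ['1'] hone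
      simp only [List.cons_append, flipRightmostZero, if_neg h1, if_neg h2, hc] at *
      simp only [List.append_assoc, List.singleton_append] at hff ⊢
      simp [hff]

theorem pyBin_pos (k : Nat) (h : 0 < k) : pyBin k = binDigits k := by
  rw [pyBin, if_neg (by omega)]

theorem zero_mem_binDigits_of_even (k : Nat) (h : 0 < k) (he : k % 2 = 0) :
    '0' ∈ binDigits k := by
  rw [binDigits_pos _ h]
  simp [he]

-- FA recurrences
theorem FA_zero : FA 0 = 1 := by
  have : pyBin 0 = ['0'] := rfl
  rw [FA, this]
  rfl

theorem FA_one : FA 1 = 2 := by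
  rw [FA, pyBin_pos 1 one_pos, binDigits_one]
  rfl

theorem FA_even (k : Nat) (h : 0 < k) : FA (2 * k) = 2 * k + 1 := by
  have hb : pyBin (2 * k) = binDigits k ++ ['0'] := by
    rw [pyBin, if_neg (by omega), binDigits_pos _ (by omega)]
    have h1 : 2 * k / 2 = k := by omega
    have hm : 2 * k % 2 = 0 := by omega
    simp [h1, hm]
  have hmem : '0' ∈ pyBin (2 * k) := by rw [hb]; simp
  rw [FA, if_pos hmem, hb, flipRightmostZero_append_zero, parseBin_append_single,
    parseBin_binDigits]
  simp

theorem FA_odd (k : Nat) (h : 0 < k) : FA (2 * k + 1) = 2 * FA k + k % 2 := by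
  have hb : pyBin (2 * k + 1) = binDigits k ++ ['1'] := by
    rw [pyBin, if_neg (by omega), binDigits_pos _ (by omega)]
    have hd : (2 * k + 1) / 2 = k := by omega
    have hm : (2 * k + 1) % 2 = 1 := by omega
    simp [hd, hm]
  by_cases hmem : '0' ∈ binDigits k
  · -- k has a zero bit
    have hmem' : '0' ∈ pyBin (2 * k + 1) := by rw [hb]; simp [hmem]
    have hFAk : FA k = parseBin (flipRightmostZero (binDigits k)) := by
      rw [FA, pyBin_pos k h, if_pos hmem]
    rcases Nat.even_or_odd k with hke | hko
    · -- k even: binDigits k = binDigits (k/2) ++ ['0']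
      obtain ⟨m, rfl⟩ := hke
      have hm : 0 < m := by omega
      have hbk : binDigits (m + m) = binDigits m ++ ['0'] := by
        rw [binDigits_pos _ (by omega)]
        have h1 : (m + m) / 2 = m := by omega
        have h2 : (m + m) % 2 = 0 := by omega
        simp [h1, h2]
      rw [FA, if_pos hmem', hb, hbk, flipRightmostZero_zero_one,
        parseBin_append_single, parseBin_append_single, parseBin_binDigits]
      rw [hFAk, hbk, flipRightmostZero_append_zero, parseBin_append_single, parseBin_binDigits]
      have hmod : (m + m) % 2 = 0 := by omega
      simp [hmod]
    · -- k odd, with a zero bit: k = 2m+1, m > 0, '0' ∈ binDigits m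
      obtain ⟨m, rfl⟩ := hko
      have hm : 0 < m := by
        rcases Nat.eq_zero_or_pos m with h0 | h0
        · exfalso
          subst h0
          rw [show 2 * 0 + 1 = 1 from rfl, binDigits_one] at hmem
          simp at hmem
        · exact h0
      have hbk : binDigits (2 * m + 1) = binDigits m ++ ['1'] := by
        rw [binDigits_pos _ (by omega)]
        have h1 : (2 * m + 1) / 2 = m := by omega
        have h2 : (2 * m + 1) % 2 = 1 := by omega
        simp [h1, h2]
      have hmm : '0' ∈ binDigits m := by
        rw [hbk] at hmem; simpa using hmem
      rw [FA, if_pos hmem', hb, hbk, flipRightmostZero_one_one _ hmm,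
        parseBin_append_single]
      rw [hFAk, hbk]
      have hmod : (2 * m + 1) % 2 = 1 := by omega
      simp [hmod]
  · -- k is all ones
    have hko : k % 2 = 1 := by
      rcases Nat.even_or_odd k with hke | hkoo
      · obtain ⟨m, rfl⟩ := hke
        exact absurd (zero_mem_binDigits_of_even (m + m) h (by omega)) hmem
      · obtain ⟨m, rfl⟩ := hkoo
        omega
    have hmem' : ¬ '0' ∈ pyBin (2 * k + 1) := by rw [hb]; simp [hmem]
    have hne : binDigits k ≠ [] := binDigits_ne_nil k h
    have hdrop : (binDigits k ++ ['1']).drop 1 = (binDigits k).drop 1 ++ ['1'] := by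
      cases hbk : binDigits k with
      | nil => exact absurd hbk hne
      | cons a l => simp
    rw [FA, if_neg hmem', hb, hdrop]
    have hassoc : ('1' :: '0' :: ((binDigits k).drop 1 ++ ['1']))
        = ('1' :: '0' :: (binDigits k).drop 1) ++ ['1'] := by simp
    rw [hassoc, parseBin_append_single]
    rw [FA, pyBin_pos k h, if_neg hmem]
    simp [hko]

-- B-side: the mask (num+1) & ~num on a natural argument, through Nat.land
def dmask (k : Nat) : Nat := (k + 1) - ((k + 1) &&& k)

theorem land_odd_even (k : Nat) : (2 * k + 1) &&& (2 * k) = 2 * k := by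
  apply Nat.eq_of_testBit_eq
  intro i
  cases i with
  | zero =>
    simp [Nat.testBit_zero]
  | succ j =>
    rw [Nat.testBit_land, Nat.testBit_succ, Nat.testBit_succ]
    have h1 : (2 * k + 1) / 2 = k := by omega
    have h2 : 2 * k / 2 = k := by omega
    rw [h1, h2]
    simp

theorem land_even_odd (k : Nat) : (2 * k + 2) &&& (2 * k + 1) = 2 * ((k + 1) &&& k) := by
  apply Nat.eq_of_testBit_eq
  intro i
  cases i with
  | zero =>
    simp [Nat.testBit_zero]
  | succ j =>
    rw [Nat.testBit_land, Nat.testBit_succ, Nat.testBit_succ, Nat.testBit_succ]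
    have h1 : (2 * k + 2) / 2 = k + 1 := by omega
    have h2 : (2 * k + 1) / 2 = k := by omega
    have h3 : 2 * ((k + 1) &&& k) / 2 = (k + 1) &&& k := by omega
    rw [h1, h2, h3, Nat.testBit_land]

theorem dmask_even (k : Nat) : dmask (2 * k) = 1 := by
  rw [dmask, land_odd_even]
  omega

theorem dmask_odd (k : Nat) : dmask (2 * k + 1) = 2 * dmask k := by
  have h : (2 * k + 1 + 1) &&& (2 * k + 1) = 2 * ((k + 1) &&& k) := by
    rw [show 2 * k + 1 + 1 = 2 * k + 2 from by omega]
    exact land_even_odd k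
  have hle : (k + 1) &&& k ≤ k + 1 := Nat.and_le_left
  rw [dmask, dmask]
  omega

theorem closestAlt_natCast (k : Nat) :
    closestAlt (k : Int) = if dmask k = 1 then (k : Int) + 1 else (k : Int) + ((dmask k / 2 : Nat) : Int) := by
  have hnot : Int.not (k : Int) = Int.negSucc k := rfl
  have hband : PySem.Int.band ((k : Int) + 1) (Int.negSucc k) = ((dmask k : Nat) : Int) := by
    simp [PySem.Int.band, dmask]
    intro hneg
    exfalso
    omega
  have hshift : (((dmask k : Nat) : Int)) >>> (1 : Nat) = ((dmask k / 2 : Nat) : Int) := by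
    have : ((dmask k : Nat) : Int) = Int.ofNat (dmask k) := rfl
    rw [this]
    have h2 : Int.ofNat (dmask k) >>> (1 : Nat) = Int.ofNat (dmask k >>> 1) := rfl
    rw [h2, Nat.shiftRight_one]
    rfl
  rw [closestAlt, hnot, hband]
  by_cases hd : dmask k = 1
  · rw [if_pos (by exact_mod_cast congrArg (Nat.cast : Nat → Int) hd), if_pos hd]
  · rw [if_neg (by exact_mod_cast fun e => hd (by exact_mod_cast e)), if_neg hd, hshift]

theorem dmask_pos (k : Nat) : 0 < dmask k := by
  induction k using Nat.strong_induction_on with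
  | _ k ih =>
    rcases Nat.even_or_odd k with he | ho
    · obtain ⟨m, rfl⟩ := he
      rw [show m + m = 2 * m from by omega, dmask_even]
      omega
    · obtain ⟨m, rfl⟩ := ho
      rcases Nat.eq_zero_or_pos m with h0 | h0
      · subst h0; decide
      · rw [dmask_odd]
        have := ih m (by omega)
        omega

-- the per-element equality
theorem FA_eq_closestAlt (n : Nat) : (FA n : Int) = closestAlt (n : Int) := by
  induction n using Nat.strong_induction_on with
  | _ n ih =>
    rcases Nat.even_or_odd n with he | ho
    · obtain ⟨k, rfl⟩ := he
      have h2 : k + k = 2 * k := by omega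
      rcases Nat.eq_zero_or_pos k with h0 | h0
      · subst h0
        rw [show (0 + 0 : Nat) = 0 from rfl, FA_zero, closestAlt_natCast, if_pos (by decide)]
        rfl
      · rw [h2, FA_even k h0, closestAlt_natCast, if_pos (by rw [dmask_even])]
        push_cast
        ring
    · obtain ⟨k, rfl⟩ := ho
      rcases Nat.eq_zero_or_pos k with h0 | h0
      · subst h0
        rw [show 2 * 0 + 1 = 1 from rfl, FA_one, closestAlt_natCast, if_neg (by decide)]
        decide
      · rw [FA_odd k h0, closestAlt_natCast, dmask_odd]
        have hdk : 0 < dmask k := dmask_pos k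
        have ihk := ih k (by omega)
        rw [closestAlt_natCast] at ihk
        by_cases hd : dmask k = 1
        · -- closest(k) = k + 1; k must be even
          rw [if_pos hd] at ihk
          have hke : k % 2 = 0 := by
            by_contra hko
            obtain ⟨m, hm⟩ : ∃ m, k = 2 * m + 1 := ⟨k / 2, by omega⟩
            rw [hm, dmask_odd] at hd
            have := dmask_pos m
            omega
          rw [if_neg (by omega), hd, hke]
          push_cast at ihk ⊢
          omega
        · rw [if_neg hd] at ihk
          have hko : k % 2 = 1 := by
            by_contra hke
            obtain ⟨m, hm⟩ : ∃ m, k = 2 * m := ⟨k / 2, by omega⟩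
            rw [hm, dmask_even] at hd
            exact hd rfl
          obtain ⟨m, hm⟩ : ∃ m, k = 2 * m + 1 := ⟨k / 2, by omega⟩
          have hdm : dmask k = 2 * dmask m := by rw [hm]; exact dmask_odd m
          have h2d : 2 * dmask k / 2 = dmask k := by omega
          have hdm2 : dmask k / 2 = dmask m := by omega
          rw [if_neg (by omega), h2d, hko, hdm]
          rw [hdm2] at ihk
          push_cast at ihk ⊢
          omega

theorem solution_foldl (l : List Int) (acc : List Int) (h : ∀ x ∈ l, 0 ≤ x) :
    l.foldl (fun answer num =>
      let b := pyBin num.toNat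
      let b' := if '0' ∈ b then flipRightmostZero b else '1' :: '0' :: b.drop 1
      answer ++ [(parseBin b' : Int)]) acc = acc ++ l.map closestAlt := by
  induction l generalizing acc with
  | nil => simp
  | cons num rest ih =>
    have hnum : 0 ≤ num := h num (by simp)
    have hrest : ∀ x ∈ rest, 0 ≤ x := fun x hx => h x (by simp [hx])
    simp only [List.foldl_cons, List.map_cons]
    rw [ih _ hrest]
    have helem : ((parseBin (if '0' ∈ pyBin num.toNat then flipRightmostZero (pyBin num.toNat)
        else '1' :: '0' :: (pyBin num.toNat).drop 1)) : Int) = closestAlt num := by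
      have h1 : ((num.toNat : Nat) : Int) = num := Int.toNat_of_nonneg hnum
      rw [← h1]
      exact FA_eq_closestAlt num.toNat
    simp only [helem]
    simp

-- ===== VERDICT (by name: the statement is the Claim_ definition above) =====
theorem solution_spec : Claim_equal_solution := by
  intro numbers _ hpre
  unfold Spec_solution solution solution_alt
  exact solution_foldl numbers [] hpre
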